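-- pv_equiv track=rewrite | github.com/thedarkzeno/modular_transformers | mlm_fly.py | getIgnoreMask
-- ===== SOURCE A (Python) =====
-- def getIgnoreMask(tokens_tensor, ignore_tokens):
--   result = []
--   finished = False
--   for v in tokens_tensor:
--     if finished == False:
--       result.append(v in ignore_tokens)
--       if v == 0:         ### Once it gets to the padding you don't need to check anymore
--         finished = True
--     else:
--       result.append(True)
--   return result
-- ===== SOURCE B (Python) =====
-- def getIgnoreMask(tokens_tensor, ignore_tokens):
--     toks = list(tokens_tensor)
--     try:
--         i = toks.index(0)
--     except ValueError:
--         return [v in ignore_tokens for v in toks]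
--     return [v in ignore_tokens for v in toks[:i + 1]] + [True] * (len(toks) - i - 1)
-- ===== Notes on version B (the rewrite author's own statement) =====
-- stated objective: alternative
-- what changed: Replace the stateful flag-carrying loop with a locate-first-padding step, a membership map over the prefix up to and including the first 0, and a replicated True tail.
import Mathlib
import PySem

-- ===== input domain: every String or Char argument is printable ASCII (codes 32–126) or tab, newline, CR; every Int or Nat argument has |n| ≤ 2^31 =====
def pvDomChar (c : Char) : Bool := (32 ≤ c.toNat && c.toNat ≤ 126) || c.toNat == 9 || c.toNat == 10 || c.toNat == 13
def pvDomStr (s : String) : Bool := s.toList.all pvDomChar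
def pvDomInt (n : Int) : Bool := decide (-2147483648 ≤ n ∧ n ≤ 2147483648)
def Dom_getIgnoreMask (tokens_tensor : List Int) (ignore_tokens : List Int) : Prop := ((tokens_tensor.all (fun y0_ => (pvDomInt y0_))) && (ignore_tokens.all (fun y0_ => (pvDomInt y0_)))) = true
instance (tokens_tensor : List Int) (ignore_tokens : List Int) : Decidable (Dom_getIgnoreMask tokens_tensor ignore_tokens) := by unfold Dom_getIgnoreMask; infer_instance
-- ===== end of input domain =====

-- B replaces A's stateful flag-carrying loop by locating the first padding token (0),
-- mapping membership over the prefix up to and including it, and replicating True for the tail.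


-- ===== PORT A =====
-- the for-loop of A: state is (result, finished)
def getIgnoreMaskLoop (ignore_tokens : List Int) (tokens : List Int)
    (result : List Bool) (finished : Bool) : List Bool :=
  match tokens with
  | [] => result
  | v :: rest =>
    if finished = false then
      let result := result ++ [ignore_tokens.contains v]
      if v = 0 then getIgnoreMaskLoop ignore_tokens rest result true
      else getIgnoreMaskLoop ignore_tokens rest result finished
    else
      getIgnoreMaskLoop ignore_tokens rest (result ++ [true]) finished

def getIgnoreMask (tokens_tensor : List Int) (ignore_tokens : List Int) : List Bool :=
  getIgnoreMaskLoop ignore_tokens tokens_tensor [] false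

-- ===== PORT B =====
def getIgnoreMask_alt (tokens_tensor : List Int) (ignore_tokens : List Int) : List Bool :=
  match PySem.List.index? tokens_tensor (0 : Int) with
  | none => tokens_tensor.map (fun v => ignore_tokens.contains v)
  | some i =>
      (tokens_tensor.take (i + 1)).map (fun v => ignore_tokens.contains v)
        ++ List.replicate (tokens_tensor.length - (i + 1)) true

-- ===== PRECONDITION & SPEC =====
def Spec_getIgnoreMask (tokens_tensor : List Int) (ignore_tokens : List Int) (out : List Bool) : Prop := out = getIgnoreMask_alt tokens_tensor ignore_tokens
instance (tokens_tensor : List Int) (ignore_tokens : List Int) (out : List Bool) : Decidable (Spec_getIgnoreMask tokens_tensor ignore_tokens out) := by unfold Spec_getIgnoreMask; infer_instance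

-- ===== CLAIM (what is proved, stated in full; the proofs are below) =====
def Claim_equal_getIgnoreMask : Prop := ∀ (tokens_tensor : List Int) (ignore_tokens : List Int), Dom_getIgnoreMask tokens_tensor ignore_tokens → Spec_getIgnoreMask tokens_tensor ignore_tokens (getIgnoreMask tokens_tensor ignore_tokens)

-- ===== LEMMAS AND PROOFS =====
theorem loop_finished (ig toks : List Int) (acc : List Bool) :
    getIgnoreMaskLoop ig toks acc true = acc ++ List.replicate toks.length true := by
  induction toks generalizing acc with
  | nil => simp [getIgnoreMaskLoop]
  | cons v rest ih =>
    simp [getIgnoreMaskLoop, ih, List.replicate_succ]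

theorem loop_unfinished (ig toks : List Int) (acc : List Bool) :
    getIgnoreMaskLoop ig toks acc false = acc ++ getIgnoreMask_alt toks ig := by
  induction toks generalizing acc with
  | nil => simp [getIgnoreMaskLoop, getIgnoreMask_alt, PySem.List.index?]
  | cons v rest ih =>
    rw [getIgnoreMaskLoop, if_pos rfl]
    by_cases hv : v = 0
    · subst hv
      rw [if_pos rfl, loop_finished]
      rw [getIgnoreMask_alt, PySem.List.index?_cons_self]
      simp
    · rw [if_neg hv, ih]
      conv_rhs => rw [getIgnoreMask_alt, PySem.List.index?_cons_of_ne rest hv]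
      cases h : PySem.List.index? rest (0 : Int) with
      | none =>
        rw [getIgnoreMask_alt, h]
        simp
      | some i =>
        simp only [Option.map_some]
        rw [getIgnoreMask_alt, h]
        simp [List.append_assoc]

-- ===== VERDICT (by name: the statement is the Claim_ definition above) =====
theorem getIgnoreMask_spec : Claim_equal_getIgnoreMask := by
  intro t ig _
  show getIgnoreMask t ig = getIgnoreMask_alt t ig
  rw [getIgnoreMask, loop_unfinished]
  simp
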